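-- pv_equiv track=rewrite | github.com/HBinhCT/Q-project | hackerearth/Algorithms/Naruto's Punishment/solution.py | rasengan
-- ===== SOURCE A (Python) =====
-- def rasengan(arr, target, i, chakra):
--     if chakra >= target:
--         return 2 ** (len(arr) - i + 1)
--     else:
--         if i > len(arr):
--             return 0
--         else:
--             return rasengan(arr, target, i + 1, chakra + arr[i - 1]) + rasengan(arr, target, i + 1, chakra)
-- ===== SOURCE B (Python) =====
-- def rasengan(arr, target, i, chakra):
--     # Iterative level-by-level (BFS) sweep with an explicit worklist instead of
--     # the binary recursion; same decision tree, traversed breadth-first.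
--     n = len(arr)
--     total = 0
--     level = [chakra]
--     for j in range(i, n + 1):
--         nxt = []
--         for c in level:
--             if c >= target:
--                 total += 2 ** (n - j + 1)
--             else:
--                 nxt.append(c + arr[j - 1])
--                 nxt.append(c)
--         level = nxt
--     return total + sum(1 for c in level if c >= target)
-- ===== Notes on version B (the rewrite author's own statement) =====
-- stated objective: alternative
-- what changed: Replaces A's top-down binary recursion by an iterative breadth-first sweep: a single loop over positions carries an explicit worklist of chakra values and an accumulated total, instead of recursing twice per element.
-- outside the precondition, e.g. on rasengan([5], 3, 4, 5): A returns 0.25, B returns 1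
import Mathlib
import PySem

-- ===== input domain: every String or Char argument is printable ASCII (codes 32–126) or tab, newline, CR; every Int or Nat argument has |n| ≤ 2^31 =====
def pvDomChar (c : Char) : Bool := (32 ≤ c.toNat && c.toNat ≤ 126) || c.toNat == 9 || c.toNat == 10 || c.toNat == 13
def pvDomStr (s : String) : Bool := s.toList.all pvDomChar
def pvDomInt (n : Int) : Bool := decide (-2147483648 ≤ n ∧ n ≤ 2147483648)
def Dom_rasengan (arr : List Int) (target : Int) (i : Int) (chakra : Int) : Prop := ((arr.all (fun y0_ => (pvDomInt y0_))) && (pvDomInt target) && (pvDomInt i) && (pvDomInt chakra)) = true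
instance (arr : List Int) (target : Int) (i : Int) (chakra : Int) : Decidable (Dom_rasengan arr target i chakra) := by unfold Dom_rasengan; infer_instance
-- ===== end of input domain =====

-- B replaces A's binary recursion by an iterative breadth-first (level-by-level)
-- sweep over an explicit worklist of chakra values; same decision tree, same cost,
-- different decomposition (objective: alternative).

-- ===== PORT A =====
-- Literal transliteration of A's recursion. 'arr[i-1]' is ported as
-- (pyGet? arr (i-1)).getD 0: inside Pre_ the index is always in range, so the
-- default is never the value Python would raise on.
def rasengan (arr : List Int) (target : Int) (i : Int) (chakra : Int) : Int :=
  if target ≤ chakra then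
    2 ^ ((arr.length : Int) - i + 1).toNat
  else if i > (arr.length : Int) then
    0
  else
    rasengan arr target (i + 1) (chakra + (PySem.List.pyGet? arr (i - 1)).getD 0)
      + rasengan arr target (i + 1) chakra
termination_by ((arr.length : Int) + 1 - i).toNat
decreasing_by all_goals omega

-- ===== PORT B =====
-- Transliteration of Source B: (total, level) pair threaded through the two folds.
def rasengan_alt (arr : List Int) (target : Int) (i : Int) (chakra : Int) : Int :=
  let n : Int := arr.length
  let s : Int × List Int :=
    (PySem.List.pyRange i (n + 1) 1).foldl
      (fun st j =>
        st.2.foldl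
          (fun st2 c =>
            if target ≤ c then
              (st2.1 + 2 ^ (n - j + 1).toNat, st2.2)
            else
              (st2.1, st2.2 ++ [c + (PySem.List.pyGet? arr (j - 1)).getD 0, c]))
          (st.1, ([] : List Int)))
      (0, [chakra])
  s.1 + ((s.2.filter (fun c => target ≤ c)).length : Int)

-- ===== PRECONDITION & SPEC =====
-- Pre_ admits exactly the inputs on which Python A returns an int: outside it A
-- either raises IndexError (chakra < target and i < 1 - len, an index below the
-- negative-wrap range) or returns a float 2**k with k < 0 (chakra ≥ target and
-- i > len + 1), which is not a value of the declared Int type.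
def Pre_rasengan (arr : List Int) (target : Int) (i : Int) (chakra : Int) : Prop :=
  (target ≤ chakra → i ≤ (arr.length : Int) + 1) ∧
  (chakra < target → ((arr.length : Int) < i ∨ 1 - (arr.length : Int) ≤ i))
instance (arr : List Int) (target : Int) (i : Int) (chakra : Int) : Decidable (Pre_rasengan arr target i chakra) := by unfold Pre_rasengan; infer_instance
def pvWitness_rasengan : List Int × Int × Int × Int := ([3, 1, 2], 4, 1, 0)

def Spec_rasengan (arr : List Int) (target : Int) (i : Int) (chakra : Int) (out : Int) : Prop := out = rasengan_alt arr target i chakra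
instance (arr : List Int) (target : Int) (i : Int) (chakra : Int) (out : Int) : Decidable (Spec_rasengan arr target i chakra out) := by unfold Spec_rasengan; infer_instance

-- ===== CLAIM (what is proved, stated in full; the proofs are below) =====
def Claim_equal_rasengan : Prop := ∀ (arr : List Int) (target : Int) (i : Int) (chakra : Int), Dom_rasengan arr target i chakra → Pre_rasengan arr target i chakra → Spec_rasengan arr target i chakra (rasengan arr target i chakra)

-- ===== LEMMAS AND PROOFS =====

-- The two fold step functions of rasengan_alt, named so lemmas can speak about them.
def pvStepI (arr : List Int) (target : Int) (j : Int) (st2 : Int × List Int) (c : Int) : Int × List Int :=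
  if target ≤ c then
    (st2.1 + 2 ^ ((arr.length : Int) - j + 1).toNat, st2.2)
  else
    (st2.1, st2.2 ++ [c + (PySem.List.pyGet? arr (j - 1)).getD 0, c])

def pvStepO (arr : List Int) (target : Int) (st : Int × List Int) (j : Int) : Int × List Int :=
  st.2.foldl (pvStepI arr target j) (st.1, ([] : List Int))

theorem alt_unfold (arr : List Int) (target i chakra : Int) :
    rasengan_alt arr target i chakra =
      (let s := (PySem.List.pyRange i ((arr.length : Int) + 1) 1).foldl (pvStepO arr target) (0, [chakra])
       s.1 + ((s.2.filter (fun c => target ≤ c)).length : Int)) := rfl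

-- Sum of A's values over a worklist: the quantity the BFS invariant conserves.
def pvSum (arr : List Int) (target : Int) (j : Int) (l : List Int) : Int :=
  (l.map (rasengan arr target j)).sum

theorem pvSum_append (arr : List Int) (target j : Int) (l1 l2 : List Int) :
    pvSum arr target j (l1 ++ l2) = pvSum arr target j l1 + pvSum arr target j l2 := by
  simp [pvSum]

-- Past the end of the array A's value is the 0/1 indicator of chakra ≥ target.
theorem rasengan_high (arr : List Int) (target j c : Int) (hj : (arr.length : Int) < j) :
    rasengan arr target j c = if target ≤ c then 1 else 0 := by
  rw [rasengan]
  by_cases hc : target ≤ c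
  · have : ((arr.length : Int) - j + 1).toNat = 0 := by omega
    simp [hc, this]
  · simp [hc, hj]

theorem pvSum_high (arr : List Int) (target j : Int) (hj : (arr.length : Int) < j)
    (l : List Int) :
    pvSum arr target j l = ((l.filter (fun c => target ≤ c)).length : Int) := by
  induction l with
  | nil => simp [pvSum]
  | cons c rest ih =>
    simp only [pvSum, List.map_cons, List.sum_cons, List.filter_cons] at *
    rw [rasengan_high arr target j c hj]
    by_cases hc : target ≤ c <;> simp [hc, ih] <;> omega

-- One inner fold (one level j, with j ≤ len) conserves total + pvSum.
theorem inner_invariant (arr : List Int) (target j : Int) (hj : j ≤ (arr.length : Int))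
    (level : List Int) (t0 : Int) (l0 : List Int) :
    (level.foldl (pvStepI arr target j) (t0, l0)).1
      + pvSum arr target (j + 1) (level.foldl (pvStepI arr target j) (t0, l0)).2
      = t0 + pvSum arr target (j + 1) l0 + pvSum arr target j level := by
  induction level generalizing t0 l0 with
  | nil => simp [pvSum]
  | cons c rest ih =>
    simp only [List.foldl_cons]
    by_cases hc : target ≤ c
    · rw [pvStepI, if_pos hc, ih]
      have : rasengan arr target j c = 2 ^ ((arr.length : Int) - j + 1).toNat := by
        rw [rasengan]; simp [hc]
      simp [pvSum, this]; ring
    · rw [pvStepI, if_neg hc, ih]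
      have hje : ¬ j > (arr.length : Int) := by omega
      have : rasengan arr target j c
          = rasengan arr target (j + 1) (c + (PySem.List.pyGet? arr (j - 1)).getD 0)
            + rasengan arr target (j + 1) c := by
        rw [rasengan]; simp [hc, hje]
      rw [pvSum_append]
      simp [pvSum, this]; ring

-- The outer fold over range(i, len+1) turns total + pvSum at level i into the
-- final total plus the 0/1 count over the last worklist.
theorem outer_invariant (arr : List Int) (target i : Int) (t0 : Int) (l0 : List Int) :
    ((PySem.List.pyRange i ((arr.length : Int) + 1) 1).foldl (pvStepO arr target) (t0, l0)).1
      + pvSum arr target ((arr.length : Int) + 1)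
          ((PySem.List.pyRange i ((arr.length : Int) + 1) 1).foldl (pvStepO arr target) (t0, l0)).2
      = t0 + pvSum arr target i l0 := by
  by_cases hi : i ≤ (arr.length : Int)
  · obtain ⟨k, hk⟩ : ∃ k : ℕ, ((arr.length : Int) - i).toNat = k := ⟨_, rfl⟩
    induction k generalizing i t0 l0 with
    | zero =>
      have : i = (arr.length : Int) := by omega
      subst this
      rw [PySem.List.pyRange_one_cons (by omega), PySem.List.pyRange_one_eq_nil (by omega)]
      simp only [List.foldl_cons, List.foldl_nil, pvStepO]
      rw [inner_invariant arr target _ (by omega)]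
      simp [pvSum]
    | succ k ih =>
      rw [PySem.List.pyRange_one_cons (by omega : i < (arr.length : Int) + 1)]
      simp only [List.foldl_cons, pvStepO]
      rw [ih (i + 1) _ _ (by omega) (by omega)]
      rw [show ((l0.foldl (pvStepI arr target i) (t0, [])) : Int × List Int)
            = l0.foldl (pvStepI arr target i) (t0, ([] : List Int)) from rfl]
      rw [inner_invariant arr target i hi]
      simp [pvSum]
  · rw [PySem.List.pyRange_one_eq_nil (by omega)]
    simp only [List.foldl_nil]
    rw [pvSum_high arr target _ (by omega)]
    by_cases hi2 : (arr.length : Int) < i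
    · rw [pvSum_high arr target i hi2]
    · omega

-- ===== VERDICT (by name: the statement is the Claim_ definition above) =====
theorem rasengan_spec : Claim_equal_rasengan := by
  intro arr target i chakra _hdom _hpre
  unfold Spec_rasengan
  rw [alt_unfold]
  simp only []
  have h := outer_invariant arr target i 0 [chakra]
  rw [pvSum_high arr target _ (by omega)] at h
  rw [h]
  simp [pvSum]
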